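-- pv_equiv track=rewrite | github.com/Timmichi/ICSearch-Engine | TextAcquisition.py | computeWordData
-- ===== SOURCE A (Python) =====
-- def computeWordData(tokens):
--     if not isinstance(tokens, list):
--         return {}
--     freq = {}
--     positions = {}
--     for i, t in enumerate(tokens):
--         if t in freq.keys():
--             freq[t] += 1
--             positions[t].append(i)
--         else:
--             freq[t] = 1
--             positions[t] = [i]
--     return freq, positions
-- ===== SOURCE B (Python) =====
-- def computeWordData(tokens):
--     if not isinstance(tokens, list):
--         return {}
--     # pass 1: distinct words in first-occurrence order
--     order = []
--     seen = set()
--     for t in tokens: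
--         if t not in seen:
--             seen.add(t)
--             order.append(t)
--     # per-word rescans of the token list
--     freq = {t: tokens.count(t) for t in order}
--     positions = {t: [i for i, x in enumerate(tokens) if x == t] for t in order}
--     return freq, positions
-- ===== Notes on version B (the rewrite author's own statement) =====
-- stated objective: alternative
-- what changed: Instead of building both dicts incrementally in one pass, B first collects the distinct tokens in first-occurrence order and then computes each word's frequency with tokens.count and its positions with an enumerate-filter comprehension (per-word rescans).
import Mathlib
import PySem

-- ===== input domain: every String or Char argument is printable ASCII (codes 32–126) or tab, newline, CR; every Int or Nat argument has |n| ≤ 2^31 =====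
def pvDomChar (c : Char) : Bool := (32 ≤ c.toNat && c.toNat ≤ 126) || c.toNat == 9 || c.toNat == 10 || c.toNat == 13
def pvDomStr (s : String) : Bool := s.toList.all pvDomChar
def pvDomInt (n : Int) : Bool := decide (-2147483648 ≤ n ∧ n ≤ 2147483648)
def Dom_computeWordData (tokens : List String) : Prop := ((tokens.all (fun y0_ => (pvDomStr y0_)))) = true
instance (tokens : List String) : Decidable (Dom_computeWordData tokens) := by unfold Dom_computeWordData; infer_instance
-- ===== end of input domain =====

-- B first collects the distinct tokens in first-occurrence order, then computes each word's
-- count and position list by rescanning the token list (alternative decomposition, not faster).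
-- The `isinstance(tokens, list)` guard of the Python is vacuous under the List String type and is dropped in both ports.

-- ===== PORT A =====
def computeWordData (tokens : List String) : (List (String × Int)) × (List (String × List Int)) :=
  let st := (PySem.List.enumerate tokens 0).foldl
    (fun (st : PySem.Dict String Int × PySem.Dict String (List Int)) it =>
      if st.1.contains it.2 then
        (st.1.modify it.2 0 (· + 1), st.2.modify it.2 [] (· ++ [it.1]))
      else
        (st.1.insert it.2 1, st.2.insert it.2 [it.1]))
    (PySem.Dict.empty, PySem.Dict.empty)
  (st.1.items, st.2.items)

-- ===== PORT B =====
def computeWordData_alt (tokens : List String) : (List (String × Int)) × (List (String × List Int)) :=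
  -- the seen/order loop is exactly set(...) insertion-order dedup = PySem.Set.ofList
  let order := PySem.Set.ofList tokens
  let freq := order.map (fun t => (t, (PySem.List.count tokens t : Int)))
  let positions := order.map (fun t =>
    (t, ((PySem.List.enumerate tokens 0).filter (fun it => it.2 == t)).map (·.1)))
  (freq, positions)

-- ===== PRECONDITION & SPEC =====
def Spec_computeWordData (tokens : List String) (out : (List (String × Int)) × (List (String × List Int))) : Prop := out = computeWordData_alt tokens
instance (tokens : List String) (out : (List (String × Int)) × (List (String × List Int))) : Decidable (Spec_computeWordData tokens out) := by unfold Spec_computeWordData; infer_instance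

-- ===== CLAIM (what is proved, stated in full; the proofs are below) =====
def Claim_equal_computeWordData : Prop := ∀ (tokens : List String), Dom_computeWordData tokens → Spec_computeWordData tokens (computeWordData tokens)

-- ===== LEMMAS AND PROOFS =====

-- The frequency-counting fold (A's first component), branch-free.
def pvFreqFold (l : List (Int × String)) : PySem.Dict String Int :=
  l.foldl (fun d it => d.modify it.2 0 (· + 1)) PySem.Dict.empty

-- The position-grouping fold (A's second component), branch-free.
def pvPosFold (l : List (Int × String)) : PySem.Dict String (List Int) :=
  l.foldl (fun d it => d.modify it.2 [] (· ++ [it.1])) PySem.Dict.empty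

-- A's paired fold, under the invariant that the two dicts have the same keys,
-- is the pair of the two branch-free folds.
lemma a_fold_eq (l : List (Int × String)) (f : PySem.Dict String Int)
    (p : PySem.Dict String (List Int)) (hk : f.keys = p.keys) :
    l.foldl (fun st it =>
        if st.1.contains it.2 then
          (st.1.modify it.2 0 (· + 1), st.2.modify it.2 [] (· ++ [it.1]))
        else (st.1.insert it.2 1, st.2.insert it.2 [it.1])) (f, p)
      = (l.foldl (fun d it => d.modify it.2 0 (· + 1)) f,
         l.foldl (fun d it => d.modify it.2 [] (· ++ [it.1])) p) := by
  induction l generalizing f p with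
  | nil => rfl
  | cons it l ih =>
    have hc : f.contains it.2 = p.contains it.2 := by
      simp [PySem.Dict.contains_eq_decide_mem_keys, hk]
    have hk' : ∀ (v : Int) (w : List Int),
        (f.insert it.2 v).keys = (p.insert it.2 w).keys := by
      intro v w
      by_cases hct : f.contains it.2 = true
      · rw [PySem.Dict.keys_insert_of_contains f v hct,
            PySem.Dict.keys_insert_of_contains p w (hc ▸ hct), hk]
      · rw [PySem.Dict.keys_insert_of_not_contains f v (by simpa using hct),
            PySem.Dict.keys_insert_of_not_contains p w (by rw [← hc]; simpa using hct), hk]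
    by_cases h : f.contains it.2 = true
    · simpa [List.foldl_cons, h] using ih _ _ (hk' _ _)
    · have hp : p.contains it.2 = false := by rw [← hc]; simpa using h
      have hf0 : f.getD it.2 0 = 0 := PySem.Dict.getD_of_not_contains _ _ (by simpa using h)
      have hp0 : p.getD it.2 [] = [] := PySem.Dict.getD_of_not_contains _ _ hp
      have ef : f.insert it.2 1 = f.modify it.2 0 (· + 1) := by
        show _ = f.insert it.2 (f.getD it.2 0 + 1); rw [hf0]; norm_num
      have ep : p.insert it.2 [it.1] = p.modify it.2 [] (· ++ [it.1]) := by
        show _ = p.insert it.2 (p.getD it.2 [] ++ [it.1]); rw [hp0]; simp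
      simpa [List.foldl_cons, h, ef, ep] using ih _ _ (hk' _ _)

lemma freq_keys (l : List (Int × String)) :
    (pvFreqFold l).keys = PySem.Set.update [] (l.map (·.2)) := by
  simpa using PySem.Dict.keys_foldl_modify_key l (·.2) 0 (fun d it => (· + 1)) PySem.Dict.empty

lemma pos_keys (l : List (Int × String)) :
    (pvPosFold l).keys = PySem.Set.update [] (l.map (·.2)) := by
  simpa using PySem.Dict.keys_foldl_modify_key l (·.2) [] (fun d it => (· ++ [it.1])) PySem.Dict.empty

lemma freq_getD (l : List (Int × String)) (t : String) :
    (pvFreqFold l).getD t 0 = ((l.map (·.2)).count t : Int) := by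
  have : pvFreqFold l = (l.map (·.2)).foldl (fun d x => d.modify x 0 (· + 1)) PySem.Dict.empty := by
    rw [pvFreqFold, List.foldl_map]
  rw [this, PySem.Dict.getD_foldl_modify_add_one]
  simp

lemma pos_getD (l : List (Int × String)) (t : String) :
    (pvPosFold l).getD t [] = (l.filter (fun it => it.2 == t)).map (·.1) := by
  have : pvPosFold l
      = (l.map (fun it => (it.2, it.1))).foldl
          (fun d q => d.modify q.1 [] (· ++ [q.2])) PySem.Dict.empty := by
    rw [pvPosFold, List.foldl_map]
  rw [this, PySem.Dict.getD_foldl_modify_append]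
  simp [List.filter_map, Function.comp_def]

-- A's freq items are B's freq list.
lemma freq_items_eq (tokens : List String) :
    (pvFreqFold (PySem.List.enumerate tokens 0)).items
      = (PySem.Set.ofList tokens).map (fun t => (t, (PySem.List.count tokens t : Int))) := by
  have hnf : (pvFreqFold (PySem.List.enumerate tokens 0)).keys.Nodup :=
    PySem.Dict.nodup_keys_foldl_modify_key (PySem.List.enumerate tokens 0) (·.2) 0
      (fun d it => (· + 1)) PySem.Dict.empty (by simp)
  rw [PySem.Dict.items_eq_map_keys _ hnf 0, freq_keys, PySem.List.map_snd_enumerate]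
  refine List.map_congr_left (fun t _ => ?_)
  have := freq_getD (PySem.List.enumerate tokens 0) t
  rw [PySem.List.map_snd_enumerate] at this
  simp [this, PySem.List.count]

-- A's positions items are B's positions list.
lemma pos_items_eq (tokens : List String) :
    (pvPosFold (PySem.List.enumerate tokens 0)).items
      = (PySem.Set.ofList tokens).map (fun t =>
          (t, ((PySem.List.enumerate tokens 0).filter (fun it => it.2 == t)).map (·.1))) := by
  have hnp : (pvPosFold (PySem.List.enumerate tokens 0)).keys.Nodup :=
    PySem.Dict.nodup_keys_foldl_modify_key (PySem.List.enumerate tokens 0) (·.2) []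
      (fun d it => (· ++ [it.1])) PySem.Dict.empty (by simp)
  rw [PySem.Dict.items_eq_map_keys _ hnp [], pos_keys, PySem.List.map_snd_enumerate]
  exact List.map_congr_left (fun t _ => by simp [pos_getD])

-- ===== VERDICT (by name: the statement is the Claim_ definition above) =====
theorem computeWordData_spec : Claim_equal_computeWordData := by
  intro tokens _
  show computeWordData tokens = computeWordData_alt tokens
  unfold computeWordData computeWordData_alt
  rw [a_fold_eq _ _ _ (by simp)]
  exact Prod.ext (freq_items_eq tokens) (pos_items_eq tokens)
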